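-- pv_equiv track=rewrite | github.com/artmerinov/unibz_data_profiling | apriori_ucc/pli.py | pli_intersection
-- ===== SOURCE A (Python) =====
-- def pli_intersection(pli1, pli2):
--     intersection = {}
--
--     for i, group1 in pli1.items():
--         for j, group2 in pli2.items():
--             common_indices = set(group1) & set(group2)
--
--             # remove singletons
--             if len(common_indices) > 1:
--                 intersection[(i, j)] = sorted(list(common_indices))
--
--     return intersection
-- ===== SOURCE B (Python) =====
-- def pli_intersection(pli1, pli2):
--     # Inverted index: for each row index x, the pli2 group keys whose group contains x.
--     member = {}
--     for j, group2 in pli2.items():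
--         for x in set(group2):
--             member.setdefault(x, []).append(j)
--
--     intersection = {}
--     for i, group1 in pli1.items():
--         # bucket the distinct indices of group1 by the pli2 group they fall in
--         common = {}
--         for x in set(group1):
--             for j in member.get(x, ()):
--                 common.setdefault(j, []).append(x)
--         for j in pli2:
--             v = common.get(j)
--             if v is not None and len(v) > 1:
--                 intersection[(i, j)] = sorted(v)
--     return intersection
-- ===== Notes on version B (the rewrite author's own statement) =====
-- stated objective: faster
-- what changed: Replaces the pairwise set-intersection double loop with an inverted index (row index -> pli2 group keys) so each group's indices are bucketed by the pli2 group they fall in, instead of intersecting every pair of groups.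
import Mathlib
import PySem

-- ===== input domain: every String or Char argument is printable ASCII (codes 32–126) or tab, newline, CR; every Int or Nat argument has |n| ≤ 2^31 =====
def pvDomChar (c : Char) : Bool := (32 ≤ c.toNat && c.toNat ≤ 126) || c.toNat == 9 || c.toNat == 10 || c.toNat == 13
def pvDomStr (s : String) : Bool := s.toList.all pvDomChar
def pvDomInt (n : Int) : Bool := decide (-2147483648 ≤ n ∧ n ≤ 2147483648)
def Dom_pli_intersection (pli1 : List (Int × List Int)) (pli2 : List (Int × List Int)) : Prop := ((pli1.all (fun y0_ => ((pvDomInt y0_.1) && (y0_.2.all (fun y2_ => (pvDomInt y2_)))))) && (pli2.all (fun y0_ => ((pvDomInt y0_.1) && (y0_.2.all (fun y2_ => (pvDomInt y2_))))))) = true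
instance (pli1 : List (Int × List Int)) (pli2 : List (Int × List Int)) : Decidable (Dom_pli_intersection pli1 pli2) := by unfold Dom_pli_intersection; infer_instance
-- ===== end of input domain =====

-- B replaces A's pairwise set-intersection double loop by an inverted index (row index -> pli2
-- group keys) plus one bucketing pass per pli1 group; measured faster on large inputs.


-- ===== PORT A =====
-- dict insertion with keys (i, j) that are pairwise distinct under Pre_ (both key lists Nodup),
-- so the dict is transcribed as its items list, built by appending.
def pli_intersection (pli1 : List (Int × List Int)) (pli2 : List (Int × List Int)) : List (Int × Int × List Int) :=
  pli1.foldl (fun acc p =>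
    pli2.foldl (fun acc2 q =>
      let common := PySem.Set.inter (PySem.Set.ofList p.2) (PySem.Set.ofList q.2)
      if 1 < common.length then acc2 ++ [(p.1, q.1, PySem.List.sorted common (fun x => x))]
      else acc2) acc) []

-- ===== PORT B =====
-- member.setdefault(x, []).append(j)  =  modify x [] (· ++ [j])
def pvMember (pli2 : List (Int × List Int)) : PySem.Dict Int (List Int) :=
  pli2.foldl (fun m q =>
    (PySem.Set.ofList q.2).foldl (fun m x => m.modify x [] (fun l => l ++ [q.1])) m)
    PySem.Dict.empty

def pvCommon (member : PySem.Dict Int (List Int)) (group1 : List Int) : PySem.Dict Int (List Int) :=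
  (PySem.Set.ofList group1).foldl (fun c x =>
    (member.getD x []).foldl (fun c j => c.modify j [] (fun l => l ++ [x])) c)
    PySem.Dict.empty

-- body of "for j in pli2: v = common.get(j); if v is not None and len(v) > 1: ..."
def pvStepB (c : PySem.Dict Int (List Int)) (i : Int)
    (acc2 : List (Int × Int × List Int)) (q : Int × List Int) : List (Int × Int × List Int) :=
  match c.get? q.1 with
  | none => acc2
  | some v => if 1 < v.length then acc2 ++ [(i, q.1, PySem.List.sorted v (fun x => x))] else acc2

def pli_intersection_alt (pli1 : List (Int × List Int)) (pli2 : List (Int × List Int)) : List (Int × Int × List Int) :=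
  let member := pvMember pli2
  pli1.foldl (fun acc p => pli2.foldl (pvStepB (pvCommon member p.2) p.1) acc) []

-- ===== PRECONDITION & SPEC =====
-- Pre_ excludes association lists with duplicate keys: such a list does not represent a Python
-- dict (dict() collapses duplicates, keeping the last value), so A's Python value there is an
-- artefact of that collapse which neither port reproduces.
def Pre_pli_intersection (pli1 : List (Int × List Int)) (pli2 : List (Int × List Int)) : Prop :=
  (pli1.map Prod.fst).Nodup ∧ (pli2.map Prod.fst).Nodup
instance (pli1 : List (Int × List Int)) (pli2 : List (Int × List Int)) : Decidable (Pre_pli_intersection pli1 pli2) := by unfold Pre_pli_intersection; infer_instance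

def pvWitness_pli_intersection : (List (Int × List Int)) × (List (Int × List Int)) :=
  ([(1, [1, 2, 3]), (2, [4, 5])], [(7, [1, 2]), (8, [3, 4, 5])])

def Spec_pli_intersection (pli1 : List (Int × List Int)) (pli2 : List (Int × List Int)) (out : List (Int × Int × List Int)) : Prop := out = pli_intersection_alt pli1 pli2
instance (pli1 : List (Int × List Int)) (pli2 : List (Int × List Int)) (out : List (Int × Int × List Int)) : Decidable (Spec_pli_intersection pli1 pli2 out) := by unfold Spec_pli_intersection; infer_instance

-- ===== CLAIM (what is proved, stated in full; the proofs are below) =====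
def Claim_equal_pli_intersection : Prop := ∀ (pli1 : List (Int × List Int)) (pli2 : List (Int × List Int)), Dom_pli_intersection pli1 pli2 → Pre_pli_intersection pli1 pli2 → Spec_pli_intersection pli1 pli2 (pli_intersection pli1 pli2)

-- ===== LEMMAS AND PROOFS =====

-- a Nodup list filtered down to one element
lemma pv_nodup_filter_beq (s : List Int) (hs : s.Nodup) (x : Int) :
    s.filter (fun y => y == x) = if x ∈ s then [x] else [] := by
  induction s with
  | nil => simp
  | cons a t ih =>
    rcases List.nodup_cons.mp hs with ⟨ha, ht⟩
    by_cases hax : a = x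
    · subst hax
      simp [ih ht, ha]
    · simp [hax, ih ht, Ne.symm hax]

-- one inner bucketing loop, queried afterwards
lemma pv_foldl_modify_getD (s : List Int) (hs : s.Nodup) (v : Int)
    (c : PySem.Dict Int (List Int)) (x : Int) :
    (s.foldl (fun c y => c.modify y [] (fun l => l ++ [v])) c).getD x []
      = c.getD x [] ++ (if x ∈ s then [v] else []) := by
  have h := PySem.Dict.getD_foldl_modify_append (s.map (fun y => (y, v))) c x
  rw [List.foldl_map] at h
  simp only [List.filter_map, Function.comp_def, List.map_map] at h
  rw [h, pv_nodup_filter_beq s hs x]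
  by_cases hx : x ∈ s <;> simp [hx]

lemma pv_member_getD_aux (l : List (Int × List Int)) (m : PySem.Dict Int (List Int)) (x : Int) :
    (l.foldl (fun m q =>
        (PySem.Set.ofList q.2).foldl (fun m x => m.modify x [] (fun l => l ++ [q.1])) m) m).getD x []
      = m.getD x [] ++ l.filterMap (fun q => if x ∈ q.2 then some q.1 else none) := by
  induction l generalizing m with
  | nil => simp
  | cons q l ih =>
    simp only [List.foldl_cons]
    rw [ih, pv_foldl_modify_getD _ (PySem.Set.nodup_ofList q.2) q.1 m x]
    by_cases hx : x ∈ q.2 <;>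
      simp [hx, PySem.Set.mem_ofList]

lemma pv_member_getD (pli2 : List (Int × List Int)) (x : Int) :
    (pvMember pli2).getD x [] = pli2.filterMap (fun q => if x ∈ q.2 then some q.1 else none) := by
  unfold pvMember
  rw [pv_member_getD_aux]
  simp [PySem.Dict.getD_empty]

lemma pv_filterMap_sublist (l : List (Int × List Int)) (x : Int) :
    (l.filterMap (fun q => if x ∈ q.2 then some q.1 else none)).Sublist (l.map Prod.fst) := by
  induction l with
  | nil => simp
  | cons q l ih =>
    by_cases hx : x ∈ q.2
    · simpa [List.filterMap_cons, hx] using ih.cons₂ q.1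
    · simpa [List.filterMap_cons, hx] using ih.cons q.1

lemma pv_member_nodup (pli2 : List (Int × List Int)) (h2 : (pli2.map Prod.fst).Nodup) (x : Int) :
    ((pvMember pli2).getD x []).Nodup := by
  rw [pv_member_getD]
  exact h2.sublist (pv_filterMap_sublist pli2 x)

lemma pv_common_getD_aux (member : PySem.Dict Int (List Int))
    (hm : ∀ x, (member.getD x []).Nodup) (j : Int) :
    ∀ (xs : List Int) (c : PySem.Dict Int (List Int)),
    (xs.foldl (fun c x =>
        (member.getD x []).foldl (fun c j => c.modify j [] (fun l => l ++ [x])) c) c).getD j []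
      = c.getD j [] ++ xs.filter (fun x => decide (j ∈ member.getD x [])) := by
  intro xs
  induction xs with
  | nil => simp
  | cons x xs ih =>
    intro c
    simp only [List.foldl_cons]
    rw [ih, pv_foldl_modify_getD _ (hm x) x c j]
    by_cases hj : j ∈ member.getD x [] <;> simp [hj]

lemma pv_common_getD (member : PySem.Dict Int (List Int))
    (hm : ∀ x, (member.getD x []).Nodup) (g1 : List Int) (j : Int) :
    (pvCommon member g1).getD j []
      = (PySem.Set.ofList g1).filter (fun x => decide (j ∈ member.getD x [])) := by
  unfold pvCommon
  rw [pv_common_getD_aux member hm j]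
  simp [PySem.Dict.getD_empty]

lemma pv_mem_member (pli2 : List (Int × List Int)) (h2 : (pli2.map Prod.fst).Nodup)
    (q : Int × List Int) (hq : q ∈ pli2) (x : Int) :
    (q.1 ∈ (pvMember pli2).getD x []) ↔ x ∈ q.2 := by
  rw [pv_member_getD]
  simp only [List.mem_filterMap]
  constructor
  · rintro ⟨r, hr, hfr⟩
    by_cases hx : x ∈ r.2
    · simp only [hx, if_pos, Option.some.injEq] at hfr
      have : r = q := List.inj_on_of_nodup_map h2 hr hq hfr
      subst this; exact hx
    · simp [hx] at hfr
  · intro hx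
    exact ⟨q, hq, by simp [hx]⟩

lemma pv_filter_eq_inter (pli2 : List (Int × List Int)) (h2 : (pli2.map Prod.fst).Nodup)
    (q : Int × List Int) (hq : q ∈ pli2) (g1 : List Int) :
    (PySem.Set.ofList g1).filter (fun x => decide (q.1 ∈ (pvMember pli2).getD x []))
      = PySem.Set.inter (PySem.Set.ofList g1) (PySem.Set.ofList q.2) := by
  show _ = List.filter _ _
  apply List.filter_congr
  intro x _
  by_cases hx : x ∈ q.2
  · simp [pv_mem_member pli2 h2 q hq x, hx, PySem.Set.mem_ofList]
  · simp [pv_mem_member pli2 h2 q hq x, hx, PySem.Set.mem_ofList]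

-- the inner pli2-loop of A equals the inner pli2-loop of B, for any group of pli1
lemma pv_inner (pli2 : List (Int × List Int)) (h2 : (pli2.map Prod.fst).Nodup)
    (p : Int × List Int) (acc : List (Int × Int × List Int)) :
    pli2.foldl (fun acc2 q =>
      let common := PySem.Set.inter (PySem.Set.ofList p.2) (PySem.Set.ofList q.2)
      if 1 < common.length then acc2 ++ [(p.1, q.1, PySem.List.sorted common (fun x => x))]
      else acc2) acc
    = pli2.foldl (pvStepB (pvCommon (pvMember pli2) p.2) p.1) acc := by
  apply List.foldl_ext
  intro acc2 q hq
  have hgd : (pvCommon (pvMember pli2) p.2).getD q.1 []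
      = PySem.Set.inter (PySem.Set.ofList p.2) (PySem.Set.ofList q.2) := by
    rw [pv_common_getD _ (pv_member_nodup pli2 h2) p.2 q.1,
      pv_filter_eq_inter pli2 h2 q hq p.2]
  cases hget : (pvCommon (pvMember pli2) p.2).get? q.1 with
  | none =>
    have h0 : PySem.Set.inter (PySem.Set.ofList p.2) (PySem.Set.ofList q.2) = [] := by
      rw [← hgd, PySem.Dict.getD_eq_get?_getD, hget]; rfl
    simp [pvStepB, hget, h0]
  | some v =>
    have hv : v = PySem.Set.inter (PySem.Set.ofList p.2) (PySem.Set.ofList q.2) := by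
      rw [← hgd, PySem.Dict.getD_eq_get?_getD, hget]; rfl
    simp [pvStepB, hget, ← hv]

-- ===== VERDICT (by name: the statement is the Claim_ definition above) =====
theorem pli_intersection_spec : Claim_equal_pli_intersection := by
  intro pli1 pli2 _ hpre
  unfold Spec_pli_intersection
  simp only [pli_intersection, pli_intersection_alt]
  apply List.foldl_ext
  intro acc p _
  exact pv_inner pli2 hpre.2 p acc
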